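-- pv_equiv track=rewrite | github.com/rogue-agent1/sqlformat | sqlformat.py | format_sql
-- ===== SOURCE A (Python) =====
-- KEYWORDS = {
--     "SELECT", "FROM", "WHERE", "AND", "OR", "NOT", "IN", "EXISTS",
--     "INSERT", "INTO", "VALUES", "UPDATE", "SET", "DELETE",
--     "JOIN", "LEFT", "RIGHT", "INNER", "OUTER", "CROSS", "FULL", "ON",
--     "GROUP", "BY", "ORDER", "ASC", "DESC", "HAVING",
--     "LIMIT", "OFFSET", "UNION", "ALL", "DISTINCT", "AS",
--     "CREATE", "TABLE", "ALTER", "DROP", "INDEX", "VIEW",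
--     "PRIMARY", "KEY", "FOREIGN", "REFERENCES", "CONSTRAINT",
--     "NULL", "DEFAULT", "CHECK", "UNIQUE", "CASCADE",
--     "IF", "ELSE", "THEN", "END", "CASE", "WHEN",
--     "COUNT", "SUM", "AVG", "MIN", "MAX", "BETWEEN", "LIKE", "IS",
--     "BEGIN", "COMMIT", "ROLLBACK", "TRANSACTION",
--     "WITH", "RECURSIVE", "EXCEPT", "INTERSECT",
-- }
--
-- NEWLINE_BEFORE = {"SELECT", "FROM", "WHERE", "JOIN", "LEFT", "RIGHT", "INNER",
--                    "GROUP", "ORDER", "HAVING", "LIMIT", "UNION", "INSERT",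
--                    "UPDATE", "DELETE", "SET", "VALUES", "WITH", "AND", "OR"}
--
-- def tokenize(sql: str) -> list[str]:
--     tokens = []
--     i = 0
--     while i < len(sql):
--         if sql[i] in (" ", "\t", "\n", "\r"):
--             i += 1
--             continue
--         if sql[i] == "'" or sql[i] == '"':
--             quote = sql[i]
--             j = i + 1
--             while j < len(sql) and sql[j] != quote:
--                 if sql[j] == "\\":
--                     j += 1
--                 j += 1
--             tokens.append(sql[i:j+1])
--             i = j + 1
--         elif sql[i:i+2] == "--":
--             j = sql.index("\n", i) if "\n" in sql[i:] else len(sql)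
--             tokens.append(sql[i:j])
--             i = j
--         elif sql[i] in "(),;*":
--             tokens.append(sql[i])
--             i += 1
--         elif sql[i:i+2] in (">=", "<=", "<>", "!=", "||"):
--             tokens.append(sql[i:i+2])
--             i += 2
--         elif sql[i] in "=<>+-/":
--             tokens.append(sql[i])
--             i += 1
--         else:
--             j = i
--             while j < len(sql) and sql[j] not in " \t\n\r(),;=<>+-*/|'\"":
--                 j += 1
--             tokens.append(sql[i:j])
--             i = j
--     return tokens
--
-- def format_sql(sql: str, indent: int = 2, uppercase: bool = True) -> str:
--     tokens = tokenize(sql)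
--     lines = []
--     current_line = []
--     depth = 0
--     pad = " " * indent
--
--     for i, tok in enumerate(tokens):
--         upper = tok.upper()
--
--         if upper in NEWLINE_BEFORE and current_line:
--             lines.append(pad * depth + " ".join(current_line))
--             current_line = []
--
--         if tok == "(":
--             depth += 1
--         elif tok == ")":
--             depth = max(0, depth - 1)
--
--         if upper in KEYWORDS and uppercase:
--             current_line.append(upper)
--         else:
--             current_line.append(tok)
--
--         if tok == ";":
--             lines.append(pad * depth + " ".join(current_line))
--             current_line = []
--             lines.append("")
--
--     if current_line:
--         lines.append(pad * depth + " ".join(current_line))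
--
--     return "\n".join(lines).strip()
-- ===== SOURCE B (Python) =====
-- KEYWORDS = {
--     "SELECT", "FROM", "WHERE", "AND", "OR", "NOT", "IN", "EXISTS",
--     "INSERT", "INTO", "VALUES", "UPDATE", "SET", "DELETE",
--     "JOIN", "LEFT", "RIGHT", "INNER", "OUTER", "CROSS", "FULL", "ON",
--     "GROUP", "BY", "ORDER", "ASC", "DESC", "HAVING",
--     "LIMIT", "OFFSET", "UNION", "ALL", "DISTINCT", "AS",
--     "CREATE", "TABLE", "ALTER", "DROP", "INDEX", "VIEW",
--     "PRIMARY", "KEY", "FOREIGN", "REFERENCES", "CONSTRAINT",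
--     "NULL", "DEFAULT", "CHECK", "UNIQUE", "CASCADE",
--     "IF", "ELSE", "THEN", "END", "CASE", "WHEN",
--     "COUNT", "SUM", "AVG", "MIN", "MAX", "BETWEEN", "LIKE", "IS",
--     "BEGIN", "COMMIT", "ROLLBACK", "TRANSACTION",
--     "WITH", "RECURSIVE", "EXCEPT", "INTERSECT",
-- }
--
-- NEWLINE_BEFORE = {"SELECT", "FROM", "WHERE", "JOIN", "LEFT", "RIGHT", "INNER",
--                    "GROUP", "ORDER", "HAVING", "LIMIT", "UNION", "INSERT",
--                    "UPDATE", "DELETE", "SET", "VALUES", "WITH", "AND", "OR"}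
--
-- _STOP = " \t\n\r(),;=<>+-*/|'\""
--
-- # One-pass character-level DFA: state = ("normal",) | ("pend", c) | ("word", buf)
-- # | ("string", quote, buf, esc) | ("comment", buf); _step emits finished tokens.
--
-- def _step(state, c):
--     kind = state[0]
--     if kind == "normal":
--         if c in " \t\n\r":
--             return state, []
--         if c == "'" or c == '"':
--             return ("string", c, c, False), []
--         if c in "(),;*":
--             return state, [c]
--         if c in "<>!|-":
--             return ("pend", c), []
--         if c in "=+/":
--             return state, [c]
--         return ("word", c), []
--     if kind == "pend":
--         p = state[1]
--         if p == "-" and c == "-":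
--             return ("comment", "--"), []
--         if p == ">" and c == "=":
--             return ("normal",), [">="]
--         if p == "<" and (c == "=" or c == ">"):
--             return ("normal",), ["<" + c]
--         if p == "!" and c == "=":
--             return ("normal",), ["!="]
--         if p == "|" and c == "|":
--             return ("normal",), ["||"]
--         if p == "!":
--             return _step(("word", "!"), c)
--         st2, out = _step(("normal",), c)
--         return st2, [p] + out
--     if kind == "word":
--         if c in _STOP:
--             st2, out = _step(("normal",), c)
--             return st2, [state[1]] + out
--         return ("word", state[1] + c), []
--     if kind == "string":
--         _, quote, buf, esc = state
--         if esc: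
--             return ("string", quote, buf + c, False), []
--         if c == "\\":
--             return ("string", quote, buf + c, True), []
--         if c == quote:
--             return ("normal",), [buf + c]
--         return ("string", quote, buf + c, False), []
--     # comment
--     if c == "\n":
--         return ("normal",), [state[1]]
--     return ("comment", state[1] + c), []
--
-- def _finish(state):
--     kind = state[0]
--     if kind == "normal":
--         return []
--     if kind == "string":
--         return [state[2]]
--     return [state[1]]
--
-- def tokenize(sql: str) -> list[str]:
--     tokens = []
--     state = ("normal",)
--     for c in sql:
--         state, out = _step(state, c)
--         tokens += out
--     tokens += _finish(state)
--     return tokens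
--
-- def _first_line(toks):
--     # one output line: the leading token (a leading ';' is a line by itself),
--     # then tokens up to (not including) the next NEWLINE_BEFORE keyword,
--     # or up to and including the next ';'.
--     if toks[0] == ";":
--         return [";"], toks[1:]
--     line = [toks[0]]
--     i = 1
--     while i < len(toks):
--         t = toks[i]
--         if t.upper() in NEWLINE_BEFORE:
--             break
--         line.append(t)
--         i += 1
--         if t == ";":
--             break
--     return line, toks[i:]
--
-- def format_sql(sql: str, indent: int = 2, uppercase: bool = True) -> str:
--     rest = tokenize(sql)
--     pad = " " * indent
--     lines = []
--     depth = 0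
--     while rest:
--         line, rest = _first_line(rest)
--         for t in line:
--             if t == "(":
--                 depth += 1
--             elif t == ")":
--                 depth = max(0, depth - 1)
--         disp = [t.upper() if uppercase and t.upper() in KEYWORDS else t
--                 for t in line]
--         lines.append(pad * depth + " ".join(disp))
--         if line[-1] == ";":
--             lines.append("")
--     return "\n".join(lines).strip()
-- ===== Notes on version B (the rewrite author's own statement) =====
-- stated objective: alternative
-- what changed: A's index-arithmetic tokenizer with nested inner while-loops is replaced by a one-pass character-level finite state machine, and A's single accumulator formatting loop (lines/current_line/depth) is replaced by a staged line-splitting pass: repeatedly cut the token stream at line boundaries with _first_line, then fold depth and render each line.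
-- outside the precondition, e.g. on format_sql('|', 2, True): A does not finish within the time limit, B returns '|'
import Mathlib
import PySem

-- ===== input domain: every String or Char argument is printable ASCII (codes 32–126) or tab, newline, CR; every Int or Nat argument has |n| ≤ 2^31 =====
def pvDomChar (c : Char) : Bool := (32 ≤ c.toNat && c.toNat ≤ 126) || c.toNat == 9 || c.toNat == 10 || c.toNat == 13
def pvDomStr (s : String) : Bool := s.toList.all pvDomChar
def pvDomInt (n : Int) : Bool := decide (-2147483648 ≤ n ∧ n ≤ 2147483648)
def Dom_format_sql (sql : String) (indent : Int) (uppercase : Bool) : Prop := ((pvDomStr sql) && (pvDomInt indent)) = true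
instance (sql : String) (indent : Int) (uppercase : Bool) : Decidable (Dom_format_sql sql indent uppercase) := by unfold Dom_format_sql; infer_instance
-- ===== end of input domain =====

-- B replaces A's index-arithmetic tokenizer by a one-pass character DFA and A's
-- single-accumulator formatting loop by a staged line-splitting pass (objective:
-- alternative algorithm, same asymptotic cost).

-- ===== PORT A =====
-- A-side helpers: the scanner's inner while-loops, ported as structural recursion
-- over the remaining suffix of the character list.
def pvWsA (c : Char) : Bool := c = ' ' || c = '\t' || c = '\n' || c = '\r'

-- c in " \t\n\r(),;=<>+-*/|'\"" (the identifier stop-set)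
def pvIsStopA (c : Char) : Bool :=
  c = ' ' || c = '\t' || c = '\n' || c = '\r' || c = '(' || c = ')' || c = ',' || c = ';' ||
  c = '=' || c = '<' || c = '>' || c = '+' || c = '-' || c = '*' || c = '/' || c = '|' ||
  c = '\'' || c = '"'

-- inner loop of the string-literal branch: scans for the closing quote, a
-- backslash skips the next character; returns (sql[i+1:j+1], rest after j)
def pvScanStr (q : Char) : List Char → List Char × List Char
  | [] => ([], [])
  | c :: r =>
    if c = q then ([c], r)
    else if c = '\\' then
      match r with
      | [] => ([c], [])
      | d :: r2 => (c :: d :: (pvScanStr q r2).1, (pvScanStr q r2).2)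
    else (c :: (pvScanStr q r).1, (pvScanStr q r).2)

-- 'sql.index("\n", i) if "\n" in sql[i:] else len(sql)' + the slice sql[i:j]
def pvScanCmt : List Char → List Char × List Char
  | [] => ([], [])
  | c :: r => if c = '\n' then ([], c :: r) else (c :: (pvScanCmt r).1, (pvScanCmt r).2)

-- inner loop of the identifier branch
def pvScanWord : List Char → List Char × List Char
  | [] => ([], [])
  | c :: r => if pvIsStopA c then ([], c :: r) else (c :: (pvScanWord r).1, (pvScanWord r).2)

-- sql[i:i+2] in (">=", "<=", "<>", "!=", "||")
def pvIsTwoA (c d : Char) : Bool :=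
  (c = '>' && d = '=') || (c = '<' && d = '=') || (c = '<' && d = '>') ||
  (c = '!' && d = '=') || (c = '|' && d = '|')

-- sql[i] in "=<>+-/"
def pvIsSingleA (c : Char) : Bool :=
  c = '=' || c = '<' || c = '>' || c = '+' || c = '-' || c = '/'

-- sql[i] in "(),;*"
def pvIsPunctA (c : Char) : Bool :=
  c = '(' || c = ')' || c = ',' || c = ';' || c = '*'

-- the main while-loop of tokenize; fuel only makes the loop total (Python A
-- loops forever on a lone code-context '|', which Pre_ excludes): on terminating
-- runs the index advances every iteration, so fuel = length + 1 never runs out.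
def pvTokA : Nat → List Char → List (List Char)
  | 0, _ => []
  | _ + 1, [] => []
  | fuel + 1, c :: rest =>
    if pvWsA c then pvTokA fuel rest
    else if c = '\'' || c = '"' then
      (c :: (pvScanStr c rest).1) :: pvTokA fuel (pvScanStr c rest).2
    else if c = '-' && rest.head? == some '-' then
      (pvScanCmt (c :: rest)).1 :: pvTokA fuel (pvScanCmt (c :: rest)).2
    else if pvIsPunctA c then [c] :: pvTokA fuel rest
    else
      match rest with
      | d :: r2 =>
        if pvIsTwoA c d then [c, d] :: pvTokA fuel r2
        else if pvIsSingleA c then [c] :: pvTokA fuel (d :: r2)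
        else (pvScanWord (c :: d :: r2)).1 :: pvTokA fuel (pvScanWord (c :: d :: r2)).2
      | [] =>
        if pvIsSingleA c then [c] :: pvTokA fuel []
        else (pvScanWord [c]).1 :: pvTokA fuel (pvScanWord [c]).2

def pvKeywordsA : List (List Char) :=
  (["SELECT", "FROM", "WHERE", "AND", "OR", "NOT", "IN", "EXISTS",
    "INSERT", "INTO", "VALUES", "UPDATE", "SET", "DELETE",
    "JOIN", "LEFT", "RIGHT", "INNER", "OUTER", "CROSS", "FULL", "ON",
    "GROUP", "BY", "ORDER", "ASC", "DESC", "HAVING",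
    "LIMIT", "OFFSET", "UNION", "ALL", "DISTINCT", "AS",
    "CREATE", "TABLE", "ALTER", "DROP", "INDEX", "VIEW",
    "PRIMARY", "KEY", "FOREIGN", "REFERENCES", "CONSTRAINT",
    "NULL", "DEFAULT", "CHECK", "UNIQUE", "CASCADE",
    "IF", "ELSE", "THEN", "END", "CASE", "WHEN",
    "COUNT", "SUM", "AVG", "MIN", "MAX", "BETWEEN", "LIKE", "IS",
    "BEGIN", "COMMIT", "ROLLBACK", "TRANSACTION",
    "WITH", "RECURSIVE", "EXCEPT", "INTERSECT"] : List String).map String.toList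

def pvNlBeforeA : List (List Char) :=
  (["SELECT", "FROM", "WHERE", "JOIN", "LEFT", "RIGHT", "INNER",
    "GROUP", "ORDER", "HAVING", "LIMIT", "UNION", "INSERT",
    "UPDATE", "DELETE", "SET", "VALUES", "WITH", "AND", "OR"] : List String).map String.toList

-- loop body of A's 'for i, tok in enumerate(tokens)' (state = (lines, current_line, depth))
def pvStepFA (pad : List Char) (uppercase : Bool)
    (st : List (List Char) × List (List Char) × Int) (itok : Int × List Char) :
    List (List Char) × List (List Char) × Int :=
  let tok := itok.2
  let upper := PySem.Chars.upper tok
  let lines := st.1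
  let cur := st.2.1
  let depth := st.2.2
  let lines := if pvNlBeforeA.contains upper && !cur.isEmpty then
      lines ++ [PySem.List.pyRepeat pad depth ++ PySem.Chars.join [' '] cur] else lines
  let cur := if pvNlBeforeA.contains upper && !cur.isEmpty then [] else cur
  let depth := if tok = ['('] then depth + 1 else if tok = [')'] then max 0 (depth - 1) else depth
  let cur := if pvKeywordsA.contains upper && uppercase then cur ++ [upper] else cur ++ [tok]
  if tok = [';'] then
    (lines ++ [PySem.List.pyRepeat pad depth ++ PySem.Chars.join [' '] cur] ++ [[]], [], depth)
  else (lines, cur, depth)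

def format_sql (sql : String) (indent : Int) (uppercase : Bool) : String :=
  let cs := sql.toList
  let tokens := pvTokA (cs.length + 1) cs
  let pad := PySem.List.pyRepeat [' '] indent
  let st := (PySem.List.enumerate tokens 0).foldl (pvStepFA pad uppercase) ([], [], 0)
  let lines := if !st.2.1.isEmpty then
      st.1 ++ [PySem.List.pyRepeat pad st.2.2 ++ PySem.Chars.join [' '] st.2.1] else st.1
  String.ofList (PySem.Chars.strip (PySem.Chars.join ['\n'] lines))

-- ===== PORT B =====
-- B-side tokenizer: the DFA state of Source B's _step.
inductive BSt where
  | normal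
  | pend (p : Char)
  | word (buf : List Char)
  | strlit (q : Char) (buf : List Char) (esc : Bool)
  | comment (buf : List Char)
deriving DecidableEq, Repr

-- Source B's _STOP string
def pvStopB : List Char := " \t\n\r(),;=<>+-*/|'\"".toList

-- _step on the "normal" state
def pvStepN (c : Char) : BSt × List (List Char) :=
  if (" \t\n\r".toList).contains c then (BSt.normal, [])
  else if c = '\'' || c = '"' then (BSt.strlit c [c] false, [])
  else if ("(),;*".toList).contains c then (BSt.normal, [[c]])
  else if ("<>!|-".toList).contains c then (BSt.pend c, [])
  else if ("=+/".toList).contains c then (BSt.normal, [[c]])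
  else (BSt.word [c], [])

-- _step on the "word" state (ends the word and reprocesses c on a stop char)
def pvStepW (buf : List Char) (c : Char) : BSt × List (List Char) :=
  if pvStopB.contains c then ((pvStepN c).1, buf :: (pvStepN c).2)
  else (BSt.word (buf ++ [c]), [])

def pvStepB : BSt → Char → BSt × List (List Char)
  | BSt.normal, c => pvStepN c
  | BSt.pend p, c =>
    if p = '-' && c = '-' then (BSt.comment ['-', '-'], [])
    else if p = '>' && c = '=' then (BSt.normal, [['>', '=']])
    else if p = '<' && (c = '=' || c = '>') then (BSt.normal, [['<', c]])
    else if p = '!' && c = '=' then (BSt.normal, [['!', '=']])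
    else if p = '|' && c = '|' then (BSt.normal, [['|', '|']])
    else if p = '!' then pvStepW ['!'] c
    else ((pvStepN c).1, [p] :: (pvStepN c).2)
  | BSt.word buf, c => pvStepW buf c
  | BSt.strlit q buf esc, c =>
    if esc then (BSt.strlit q (buf ++ [c]) false, [])
    else if c = '\\' then (BSt.strlit q (buf ++ [c]) true, [])
    else if c = q then (BSt.normal, [buf ++ [c]])
    else (BSt.strlit q (buf ++ [c]) false, [])
  | BSt.comment buf, c =>
    if c = '\n' then (BSt.normal, [buf])
    else (BSt.comment (buf ++ [c]), [])

def pvFinishB : BSt → List (List Char)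
  | BSt.normal => []
  | BSt.pend p => [[p]]
  | BSt.word buf => [buf]
  | BSt.strlit _ buf _ => [buf]
  | BSt.comment buf => [buf]

def pvTokB (cs : List Char) : List (List Char) :=
  let r := cs.foldl (fun acc c => ((pvStepB acc.1 c).1, acc.2 ++ (pvStepB acc.1 c).2))
      (BSt.normal, ([] : List (List Char)))
  r.2 ++ pvFinishB r.1

-- B-side formatter: staged line splitting.
-- 't.upper() if uppercase and t.upper() in KEYWORDS else t'
def pvDispB (uppercase : Bool) (t : List Char) : List Char :=
  if uppercase && pvKeywordsA.contains (PySem.Chars.upper t) then PySem.Chars.upper t else t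

-- depth update of one token (the for-loop body over the line)
def pvDepthUpd (depth : Int) (t : List Char) : Int :=
  if t = ['('] then depth + 1 else if t = [')'] then max 0 (depth - 1) else depth

-- the while-loop inside _first_line
def pvTakeB : List (List Char) → List (List Char) × List (List Char)
  | [] => ([], [])
  | t :: ts =>
    if pvNlBeforeA.contains (PySem.Chars.upper t) then ([], t :: ts)
    else if t = [';'] then ([t], ts)
    else (t :: (pvTakeB ts).1, (pvTakeB ts).2)

def pvFirstLine : List (List Char) → List (List Char) × List (List Char)
  | [] => ([], [])
  | t :: ts => if t = [';'] then ([t], ts) else (t :: (pvTakeB ts).1, (pvTakeB ts).2)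

lemma pvTakeB_len (ts : List (List Char)) : (pvTakeB ts).2.length ≤ ts.length := by
  fun_induction pvTakeB ts <;> simp_all <;> omega

lemma pvFirstLine_len (t : List Char) (ts : List (List Char)) :
    (pvFirstLine (t :: ts)).2.length < (t :: ts).length := by
  simp only [pvFirstLine]
  split
  · simp
  · have := pvTakeB_len ts; simp; omega

-- the 'while rest:' loop of Source B's format_sql
def pvLayout (pad : List Char) (uppercase : Bool) : List (List Char) → Int → List (List Char)
  | [], _ => []
  | t :: ts, depth =>
    let line := (pvFirstLine (t :: ts)).1
    let d := line.foldl pvDepthUpd depth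
    (PySem.List.pyRepeat pad d ++ PySem.Chars.join [' '] (line.map (pvDispB uppercase))) ::
      ((if line.getLast? = some [';'] then [([] : List Char)] else []) ++
        pvLayout pad uppercase (pvFirstLine (t :: ts)).2 d)
  termination_by l _ => l.length
  decreasing_by exact pvFirstLine_len t ts

def format_sql_alt (sql : String) (indent : Int) (uppercase : Bool) : String :=
  String.ofList (PySem.Chars.strip (PySem.Chars.join ['\n']
    (pvLayout (PySem.List.pyRepeat [' '] indent) uppercase (pvTokB sql.toList) 0)))

-- ===== PRECONDITION & SPEC =====
-- lexical-context scanner state used only by Pre_ below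
inductive PSt where
  | code | pipe | dash | cmt | bad
  | instr (q : Char) (esc : Bool)
deriving DecidableEq, Repr

def pvCtx (c : Char) : PSt :=
  if c = '|' then PSt.pipe else if c = '-' then PSt.dash
  else if c = '\'' || c = '"' then PSt.instr c false else PSt.code

def pvPreStep (st : PSt) (c : Char) : PSt :=
  match st with
  | PSt.code => pvCtx c
  | PSt.pipe => if c = '|' then PSt.code else PSt.bad
  | PSt.dash => if c = '-' then PSt.cmt else pvCtx c
  | PSt.cmt => if c = '\n' then PSt.code else PSt.cmt
  | PSt.bad => PSt.bad
  | PSt.instr q esc =>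
    if esc then PSt.instr q false
    else if c = '\\' then PSt.instr q true
    else if c = q then PSt.code else PSt.instr q false

def pvOkSt : PSt → Bool
  | PSt.pipe => false
  | PSt.bad => false
  | _ => true

-- Pre_ excludes exactly the inputs on which Python A never returns: a maximal
-- run of '|' of odd length occurring in code context (outside string literals
-- and line comments) makes A's tokenizer append an empty token without advancing
-- and loop forever; on every other input A returns and B matches it.
def Pre_format_sql (sql : String) (indent : Int) (uppercase : Bool) : Prop :=
  pvOkSt (sql.toList.foldl pvPreStep PSt.code) = true
instance (sql : String) (indent : Int) (uppercase : Bool) : Decidable (Pre_format_sql sql indent uppercase) := by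
  unfold Pre_format_sql; infer_instance

def pvWitness_format_sql : String × Int × Bool :=
  ("SELECT a FROM t WHERE x = 'a|b'; -- c|d", 2, true)

def Spec_format_sql (sql : String) (indent : Int) (uppercase : Bool) (out : String) : Prop :=
  out = format_sql_alt sql indent uppercase
instance (sql : String) (indent : Int) (uppercase : Bool) (out : String) : Decidable (Spec_format_sql sql indent uppercase out) := by
  unfold Spec_format_sql; infer_instance

-- ===== CLAIM (what is proved, stated in full; the proofs are below) =====
def Claim_equal_format_sql : Prop := ∀ (sql : String) (indent : Int) (uppercase : Bool), Dom_format_sql sql indent uppercase → Pre_format_sql sql indent uppercase → Spec_format_sql sql indent uppercase (format_sql sql indent uppercase)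

-- ===== LEMMAS AND PROOFS =====

-- B's token stream from a given DFA state, consumed structurally (proof device).
def pvBexec : BSt → List Char → List (List Char)
  | st, [] => pvFinishB st
  | st, c :: r => (pvStepB st c).2 ++ pvBexec (pvStepB st c).1 r

lemma pvBexec_cons (st : BSt) (c : Char) (r : List Char) :
    pvBexec st (c :: r) = (pvStepB st c).2 ++ pvBexec (pvStepB st c).1 r := rfl

lemma pvStopB_eq (c : Char) : pvStopB.contains c = pvIsStopA c := by
  show ([' ','\t','\n','\r','(',')',',',';','=','<','>','+','-','*','/','|','\'','"'] : List Char).contains c = pvIsStopA c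
  simp [List.contains_eq_mem, pvIsStopA]
  ac_rfl

lemma pvStopB_mem (c : Char) : (c ∈ pvStopB) ↔ pvIsStopA c = true := by
  rw [← pvStopB_eq]
  simp [List.contains_eq_mem]

lemma pvFold_eq (cs : List Char) (st : BSt) (acc : List (List Char)) :
    (cs.foldl (fun acc c => ((pvStepB acc.1 c).1, acc.2 ++ (pvStepB acc.1 c).2)) (st, acc)).2 ++
      pvFinishB (cs.foldl (fun acc c => ((pvStepB acc.1 c).1, acc.2 ++ (pvStepB acc.1 c).2)) (st, acc)).1 =
    acc ++ pvBexec st cs := by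
  induction cs generalizing st acc with
  | nil => simp [pvBexec]
  | cons c r ih =>
    simp only [List.foldl_cons]
    rw [pvBexec_cons, ih]
    simp

lemma pvTokB_eq (cs : List Char) : pvTokB cs = pvBexec BSt.normal cs := by
  simpa [pvTokB] using pvFold_eq cs BSt.normal []

lemma pvScanStr_append (q : Char) (cs : List Char) :
    (pvScanStr q cs).1 ++ (pvScanStr q cs).2 = cs := by
  fun_induction pvScanStr q cs <;> simp_all

lemma pvScanCmt_append (cs : List Char) :
    (pvScanCmt cs).1 ++ (pvScanCmt cs).2 = cs := by
  fun_induction pvScanCmt cs <;> simp_all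

lemma pvScanWord_append (cs : List Char) :
    (pvScanWord cs).1 ++ (pvScanWord cs).2 = cs := by
  fun_induction pvScanWord cs <;> simp_all

lemma pvScanStr_len (q : Char) (cs : List Char) : (pvScanStr q cs).2.length ≤ cs.length := by
  have := congrArg List.length (pvScanStr_append q cs)
  simp only [List.length_append] at this; omega

lemma pvScanCmt_len (cs : List Char) : (pvScanCmt cs).2.length ≤ cs.length := by
  have := congrArg List.length (pvScanCmt_append cs)
  simp only [List.length_append] at this; omega

lemma pvScanWord_len (cs : List Char) : (pvScanWord cs).2.length ≤ cs.length := by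
  have := congrArg List.length (pvScanWord_append cs)
  simp only [List.length_append] at this; omega

-- the three "one token, then back to normal" lemmas about B's machine
lemma pvL_str (q : Char) (hq : ¬ q = '\\') (cs : List Char) : ∀ buf,
    pvBexec (BSt.strlit q buf false) cs =
      (buf ++ (pvScanStr q cs).1) :: pvBexec BSt.normal (pvScanStr q cs).2 := by
  fun_induction pvScanStr q cs with
  | case1 => intro buf; simp [pvBexec, pvFinishB, pvScanStr]
  | case2 r2 =>
    intro buf
    simp [pvBexec_cons, pvStepB, hq]
  | case3 h =>
    intro buf
    simp [pvBexec_cons, pvStepB, pvBexec, pvFinishB, h]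
  | case4 d r2 h ih =>
    intro buf
    simp only [pvBexec_cons, pvStepB, Bool.false_eq_true, if_false, if_pos rfl, if_neg h,
      if_true]
    rw [ih]
    simp
  | case5 d r2 h h2 ih =>
    intro buf
    simp only [pvBexec_cons, pvStepB, Bool.false_eq_true, if_false, if_neg h, if_neg h2]
    rw [ih]
    simp [pvScanStr, h, h2]

lemma pvL_cmt (cs : List Char) : ∀ buf,
    pvBexec (BSt.comment buf) cs =
      (buf ++ (pvScanCmt cs).1) :: pvBexec BSt.normal (pvScanCmt cs).2 := by
  fun_induction pvScanCmt cs with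
  | case1 => intro buf; simp [pvBexec, pvFinishB]
  | case2 r =>
    intro buf
    simp [pvBexec_cons, pvStepB, pvStepN]
  | case3 c r h ih =>
    intro buf
    simp only [pvBexec_cons, pvStepB, if_neg h]
    rw [ih]
    simp [pvScanCmt, h]

lemma pvL_word (cs : List Char) : ∀ buf,
    pvBexec (BSt.word buf) cs =
      (buf ++ (pvScanWord cs).1) :: pvBexec BSt.normal (pvScanWord cs).2 := by
  fun_induction pvScanWord cs with
  | case1 => intro buf; simp [pvBexec, pvFinishB]
  | case2 c r h =>
    intro buf
    simp [pvBexec_cons, pvStepB, pvStepW, pvStopB_mem, h]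
  | case3 c r h ih =>
    intro buf
    have hc : pvStopB.contains c = false := by rw [pvStopB_eq]; simpa using h
    simp only [pvBexec_cons, pvStepB, pvStepW, hc, Bool.false_eq_true, if_false]
    rw [ih]
    simp [pvScanWord, h]

-- Pre_-side facts
lemma pvBad_absorb (l : List Char) : l.foldl pvPreStep PSt.bad = PSt.bad := by
  induction l with
  | nil => rfl
  | cons c r ih => simpa [pvPreStep] using ih

lemma pvCode_cons {c : Char} (rest : List Char) (h1 : ¬ c = '|') (h2 : ¬ c = '-')
    (h3 : ¬ c = '\'') (h4 : ¬ c = '"') :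
    (c :: rest).foldl pvPreStep PSt.code = rest.foldl pvPreStep PSt.code := by
  simp [List.foldl_cons, pvPreStep, pvCtx, h1, h2, h3, h4]

lemma pvAcc_str (q : Char) (hq : ¬ q = '\\') (cs : List Char) :
    pvOkSt (cs.foldl pvPreStep (PSt.instr q false)) =
      pvOkSt ((pvScanStr q cs).2.foldl pvPreStep PSt.code) := by
  fun_induction pvScanStr q cs with
  | case1 => rfl
  | case2 r2 => simp [List.foldl_cons, pvPreStep, hq]
  | case3 h => simp [List.foldl_cons, pvPreStep, pvOkSt]
  | case4 d r2 h ih =>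
    simp only [List.foldl_cons, pvPreStep, if_pos rfl, Bool.false_eq_true, if_false] at *
    simpa using ih
  | case5 d r2 h h2 ih =>
    simp only [List.foldl_cons, pvPreStep, if_neg h, if_neg h2, Bool.false_eq_true, if_false] at *
    simpa [pvScanStr, h, h2] using ih

lemma pvAcc_cmt (cs : List Char) :
    pvOkSt (cs.foldl pvPreStep PSt.cmt) =
      pvOkSt ((pvScanCmt cs).2.foldl pvPreStep PSt.code) := by
  fun_induction pvScanCmt cs with
  | case1 => rfl
  | case2 r => simp [List.foldl_cons, pvPreStep, pvCtx]
  | case3 c r h ih => simpa [List.foldl_cons, pvPreStep, pvScanCmt, h] using ih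

lemma pvCtx_code {c : Char} (h : pvIsStopA c = false) : pvCtx c = PSt.code := by
  have h1 : ¬ c = '|' := by rintro rfl; simp [pvIsStopA] at h
  have h2 : ¬ c = '-' := by rintro rfl; simp [pvIsStopA] at h
  have h3 : ¬ c = '\'' := by rintro rfl; simp [pvIsStopA] at h
  have h4 : ¬ c = '"' := by rintro rfl; simp [pvIsStopA] at h
  simp [pvCtx, h1, h2, h3, h4]

lemma pvAcc_word (cs : List Char) :
    pvOkSt (cs.foldl pvPreStep PSt.code) =
      pvOkSt ((pvScanWord cs).2.foldl pvPreStep PSt.code) := by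
  fun_induction pvScanWord cs with
  | case1 => rfl
  | case2 c r h => simp [pvScanWord, h]
  | case3 c r h ih =>
    rw [← ih, List.foldl_cons]
    simp only [pvPreStep, pvCtx_code (by simpa using h)]

lemma pvAcc_pipe {rest : List Char}
    (h : pvOkSt (('|' :: rest).foldl pvPreStep PSt.code) = true) :
    ∃ r2, rest = '|' :: r2 ∧ pvOkSt (r2.foldl pvPreStep PSt.code) = true := by
  cases rest with
  | nil => simp [List.foldl_cons, pvPreStep, pvCtx, pvOkSt] at h
  | cons d r2 =>
    by_cases hd : d = '|'
    · subst hd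
      refine ⟨r2, rfl, ?_⟩
      simpa [List.foldl_cons, pvPreStep, pvCtx] using h
    · exfalso
      have h2 : ('|' :: d :: r2).foldl pvPreStep PSt.code = PSt.bad := by
        simp [List.foldl_cons, pvPreStep, pvCtx, hd, pvBad_absorb]
      rw [h2] at h
      simp [pvOkSt] at h

-- tokenizer equivalence on Pre_
lemma pvMain : ∀ (fuel : Nat) (cs : List Char),
    pvOkSt (cs.foldl pvPreStep PSt.code) = true → cs.length < fuel →
    pvTokA fuel cs = pvBexec BSt.normal cs := by
  intro fuel
  induction fuel with
  | zero => intro cs _ h; exact absurd h (by omega)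
  | succ fuel ih =>
    intro cs hp hl
    cases cs with
    | nil => simp [pvTokA, pvBexec, pvFinishB]
    | cons c rest =>
      simp only [List.length_cons] at hl
      have hlr : rest.length < fuel := by omega
      have hnil : pvTokA fuel [] = [] := by
        cases fuel with
        | zero => exact absurd hlr (by omega)
        | succ f => rfl
      by_cases hws : pvWsA c = true
      · rcases (by simpa [pvWsA] using hws :
            ((c = ' ' ∨ c = '\t') ∨ c = '\n') ∨ c = '\r') with ((rfl|rfl)|rfl)|rfl <;>
        · simp [pvTokA, pvWsA, pvBexec_cons, pvStepB, pvStepN]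
          exact ih rest (by rwa [pvCode_cons rest (by decide) (by decide) (by decide) (by decide)] at hp) hlr
      · have hwsf : pvWsA c = false := by simpa using hws
        obtain ⟨⟨⟨hw1, hw2⟩, hw3⟩, hw4⟩ :
            ((¬c = ' ' ∧ ¬c = '\t') ∧ ¬c = '\n') ∧ ¬c = '\r' := by
          simpa [pvWsA] using hwsf
        by_cases hq : c = '\'' ∨ c = '"'
        · -- string literal
          rcases hq with rfl | rfl
          · have hp2 : pvOkSt ((pvScanStr '\'' rest).2.foldl pvPreStep PSt.code) = true := by
              rw [← pvAcc_str '\'' (by decide) rest]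
              simpa [List.foldl_cons, pvPreStep, pvCtx] using hp
            simp only [pvTokA, pvBexec_cons]
            simp [pvWsA, pvStepB, pvStepN]
            rw [pvL_str '\'' (by decide) rest]
            rw [ih _ hp2 (lt_of_le_of_lt (pvScanStr_len _ _) hlr)]
            simp
          · have hp2 : pvOkSt ((pvScanStr '"' rest).2.foldl pvPreStep PSt.code) = true := by
              rw [← pvAcc_str '"' (by decide) rest]
              simpa [List.foldl_cons, pvPreStep, pvCtx] using hp
            simp only [pvTokA, pvBexec_cons]
            simp [pvWsA, pvStepB, pvStepN]
            rw [pvL_str '"' (by decide) rest]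
            rw [ih _ hp2 (lt_of_le_of_lt (pvScanStr_len _ _) hlr)]
            simp
        · have hq1 : ¬c = '\'' := fun h => hq (Or.inl h)
          have hq2 : ¬c = '"' := fun h => hq (Or.inr h)
          by_cases hcm : c = '-' ∧ rest.head? = some '-'
          · -- comment
            obtain ⟨rfl, hh⟩ := hcm
            cases rest with
            | nil => simp at hh
            | cons d r2 =>
              have hd : d = '-' := by simpa using hh
              subst hd
              have hp2 : pvOkSt ((pvScanCmt r2).2.foldl pvPreStep PSt.code) = true := by
                rw [← pvAcc_cmt r2]
                simpa [List.foldl_cons, pvPreStep, pvCtx] using hp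
              have hlen := pvScanCmt_len r2
              have hl2 : r2.length + 1 + 1 < fuel + 1 := by simpa using hl
              simp [pvTokA, pvWsA, pvBexec_cons, pvStepB, pvStepN, pvScanCmt]
              rw [pvL_cmt r2]
              rw [ih _ hp2 (by omega)]
              simp
          · by_cases hpu : pvIsPunctA c = true
            · rcases (by simpa [pvIsPunctA] using hpu :
                  (((c = '(' ∨ c = ')') ∨ c = ',') ∨ c = ';') ∨ c = '*') with
                (((rfl|rfl)|rfl)|rfl)|rfl <;>
              · simp [pvTokA, pvWsA, pvIsPunctA, pvBexec_cons, pvStepB, pvStepN]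
                exact ih rest (by rwa [pvCode_cons rest (by decide) (by decide) (by decide) (by decide)] at hp) hlr
            · obtain ⟨⟨⟨⟨hu1, hu2⟩, hu3⟩, hu4⟩, hu5⟩ :
                  (((¬c = '(' ∧ ¬c = ')') ∧ ¬c = ',') ∧ ¬c = ';') ∧ ¬c = '*' := by
                simpa [pvIsPunctA] using hpu
              by_cases hsg : c = '=' ∨ c = '+' ∨ c = '/'
              · -- plain single-char operator
                rcases hsg with rfl | rfl | rfl <;>
                · cases rest with
                  | nil =>
                    simp [pvTokA, pvWsA, pvIsPunctA, pvIsSingleA, hnil,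
                      pvBexec_cons, pvBexec, pvStepB, pvStepN, pvFinishB]
                  | cons d r2 =>
                    have hpr := hp
                    rw [pvCode_cons (d :: r2) (by decide) (by decide) (by decide) (by decide)] at hpr
                    conv_lhs => simp [pvTokA, pvWsA, pvIsPunctA, pvIsTwoA, pvIsSingleA]
                    rw [ih (d :: r2) hpr hlr]
                    simp [pvBexec_cons, pvStepB, pvStepN]
              · have hs1 : ¬c = '=' := fun h => hsg (Or.inl h)
                have hs2 : ¬c = '+' := fun h => hsg (Or.inr (Or.inl h))
                have hs3 : ¬c = '/' := fun h => hsg (Or.inr (Or.inr h))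
                by_cases hpd : c = '<' ∨ c = '>' ∨ c = '!' ∨ c = '|' ∨ c = '-'
                · -- a character that opens a possible two-char operator
                  rcases hpd with rfl | rfl | rfl | rfl | rfl
                  · -- '<'
                    cases rest with
                    | nil =>
                      simp [pvTokA, pvWsA, pvIsPunctA, pvIsSingleA, hnil,
                        pvBexec_cons, pvBexec, pvStepB, pvStepN, pvFinishB]
                    | cons d r2 =>
                      have hpr := hp
                      rw [pvCode_cons (d :: r2) (by decide) (by decide) (by decide) (by decide)] at hpr
                      have hl2 : r2.length + 1 + 1 < fuel + 1 := by simpa using hl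
                      by_cases hd : d = '=' ∨ d = '>'
                      · rcases hd with rfl | rfl <;>
                        · have hpr2 := hpr
                          rw [pvCode_cons r2 (by decide) (by decide) (by decide) (by decide)] at hpr2
                          conv_lhs => simp [pvTokA, pvWsA, pvIsPunctA, pvIsTwoA]
                          rw [ih r2 hpr2 (by omega)]
                          simp [pvBexec_cons, pvStepB, pvStepN]
                      · have hd1 : ¬d = '=' := fun h => hd (Or.inl h)
                        have hd2 : ¬d = '>' := fun h => hd (Or.inr h)
                        conv_lhs => simp [pvTokA, pvWsA, pvIsPunctA, pvIsTwoA, pvIsSingleA,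
                          hd1, hd2]
                        rw [ih (d :: r2) hpr hlr]
                        simp [pvBexec_cons, pvStepB, pvStepN, hd1, hd2]
                  · -- '>'
                    cases rest with
                    | nil =>
                      simp [pvTokA, pvWsA, pvIsPunctA, pvIsSingleA, hnil,
                        pvBexec_cons, pvBexec, pvStepB, pvStepN, pvFinishB]
                    | cons d r2 =>
                      have hpr := hp
                      rw [pvCode_cons (d :: r2) (by decide) (by decide) (by decide) (by decide)] at hpr
                      have hl2 : r2.length + 1 + 1 < fuel + 1 := by simpa using hl
                      by_cases hd : d = '='
                      · subst hd
                        have hpr2 := hpr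
                        rw [pvCode_cons r2 (by decide) (by decide) (by decide) (by decide)] at hpr2
                        conv_lhs => simp [pvTokA, pvWsA, pvIsPunctA, pvIsTwoA]
                        rw [ih r2 hpr2 (by omega)]
                        simp [pvBexec_cons, pvStepB, pvStepN]
                      · conv_lhs => simp [pvTokA, pvWsA, pvIsPunctA, pvIsTwoA, pvIsSingleA, hd]
                        rw [ih (d :: r2) hpr hlr]
                        simp [pvBexec_cons, pvStepB, pvStepN, hd]
                  · -- '!'
                    cases rest with
                    | nil =>
                      simp [pvTokA, pvWsA, pvIsPunctA, pvIsSingleA, hnil, pvScanWord,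
                        pvIsStopA, pvBexec_cons, pvBexec, pvStepB, pvStepN, pvFinishB]
                    | cons d r2 =>
                      have hpr := hp
                      rw [pvCode_cons (d :: r2) (by decide) (by decide) (by decide) (by decide)] at hpr
                      have hl2 : r2.length + 1 + 1 < fuel + 1 := by simpa using hl
                      by_cases hd : d = '='
                      · subst hd
                        have hpr2 := hpr
                        rw [pvCode_cons r2 (by decide) (by decide) (by decide) (by decide)] at hpr2
                        conv_lhs => simp [pvTokA, pvWsA, pvIsPunctA, pvIsTwoA]
                        rw [ih r2 hpr2 (by omega)]
                        simp [pvBexec_cons, pvStepB, pvStepN]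
                      · have hp2 : pvOkSt ((pvScanWord (d :: r2)).2.foldl pvPreStep PSt.code) = true := by
                          rw [← pvAcc_word (d :: r2)]; exact hpr
                        have hstep : pvStepB (BSt.pend '!') d = pvStepB (BSt.word ['!']) d := by
                          simp [pvStepB, hd]
                        have hBx : pvBexec (BSt.pend '!') (d :: r2) =
                            pvBexec (BSt.word ['!']) (d :: r2) := by
                          rw [pvBexec_cons, pvBexec_cons, hstep]
                        conv_lhs => simp [pvTokA, pvWsA, pvIsPunctA, pvIsTwoA, pvIsSingleA, hd]
                        rw [show pvScanWord ('!' :: d :: r2) =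
                            ('!' :: (pvScanWord (d :: r2)).1, (pvScanWord (d :: r2)).2) from by
                          simp [pvScanWord, pvIsStopA]]
                        rw [ih _ hp2 (lt_of_le_of_lt (pvScanWord_len _) hlr)]
                        rw [show pvBexec BSt.normal ('!' :: d :: r2) =
                            pvBexec (BSt.pend '!') (d :: r2) from rfl]
                        rw [hBx, pvL_word (d :: r2) ['!']]
                        simp
                  · -- '|' : Pre_ forces the next character to be '|'
                    obtain ⟨r2, rfl, hp2⟩ := pvAcc_pipe hp
                    have hl2 : r2.length + 1 + 1 < fuel + 1 := by simpa using hl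
                    conv_lhs => simp [pvTokA, pvWsA, pvIsPunctA, pvIsTwoA]
                    rw [ih r2 hp2 (by omega)]
                    simp [pvBexec_cons, pvStepB, pvStepN]
                  · -- '-' (no comment: rest does not start with '-')
                    cases rest with
                    | nil =>
                      simp [pvTokA, pvWsA, pvIsPunctA, pvIsSingleA, hnil,
                        pvBexec_cons, pvBexec, pvStepB, pvStepN, pvFinishB]
                    | cons d r2 =>
                      have hd : ¬d = '-' := by
                        intro h; exact hcm ⟨rfl, by simp [h]⟩
                      have hpr : pvOkSt ((d :: r2).foldl pvPreStep PSt.code) = true := by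
                        simpa [List.foldl_cons, pvPreStep, pvCtx, hd] using hp
                      conv_lhs => simp [pvTokA, pvWsA, pvIsPunctA, pvIsTwoA, pvIsSingleA, hd]
                      rw [ih (d :: r2) hpr hlr]
                      simp [pvBexec_cons, pvStepB, pvStepN, hd]
                · -- identifier
                  have hd1 : ¬c = '<' := fun h => hpd (Or.inl h)
                  have hd2 : ¬c = '>' := fun h => hpd (Or.inr (Or.inl h))
                  have hd3 : ¬c = '!' := fun h => hpd (Or.inr (Or.inr (Or.inl h)))
                  have hd4 : ¬c = '|' := fun h => hpd (Or.inr (Or.inr (Or.inr (Or.inl h))))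
                  have hd5 : ¬c = '-' := fun h => hpd (Or.inr (Or.inr (Or.inr (Or.inr h))))
                  have hstop : pvIsStopA c = false := by
                    simp [pvIsStopA, hw1, hw2, hw3, hw4, hu1, hu2, hu3, hu4, hu5,
                      hs1, hs2, hs3, hd1, hd2, hd3, hd4, hd5, hq1, hq2]
                  have hp2 : pvOkSt ((pvScanWord rest).2.foldl pvPreStep PSt.code) = true := by
                    rw [← pvAcc_word rest]
                    rwa [pvCode_cons rest hd4 hd5 hq1 hq2] at hp
                  have hstepc : pvStepN c = (BSt.word [c], []) := by
                    simp [pvStepN, hw1, hw2, hw3, hw4, hq1, hq2, hu1, hu2, hu3, hu4, hu5,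
                      hd1, hd2, hd3, hd4, hd5, hs1, hs2, hs3]
                  have hsgf : pvIsSingleA c = false := by
                    simp [pvIsSingleA, hs1, hd1, hd2, hs2, hd5, hs3]
                  cases rest with
                  | nil =>
                    have hscan : pvScanWord [c] = ([c], []) := by
                      simp [pvScanWord, hstop]
                    conv_lhs => simp [pvTokA, hwsf, hq1, hq2, hd5, hpu, hsgf]
                    rw [hscan, hnil]
                    rw [show pvBexec BSt.normal [c] =
                        (pvStepN c).2 ++ pvBexec (pvStepN c).1 [] from rfl, hstepc]
                    simp [pvBexec, pvFinishB]
                  | cons d r2 =>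
                    have htwo : pvIsTwoA c d = false := by
                      simp [pvIsTwoA, hd1, hd2, hd3, hd4]
                    have hscan : pvScanWord (c :: d :: r2) =
                        (c :: (pvScanWord (d :: r2)).1, (pvScanWord (d :: r2)).2) := by
                      simp [pvScanWord, hstop]
                    have hp3 : pvOkSt ((pvScanWord (d :: r2)).2.foldl pvPreStep PSt.code) = true := by
                      rw [← pvAcc_word (d :: r2)]
                      rwa [pvCode_cons (d :: r2) hd4 hd5 hq1 hq2] at hp
                    conv_lhs => simp [pvTokA, hwsf, hq1, hq2, hd5, hpu, htwo, hsgf]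
                    rw [hscan, ih _ hp3 (lt_of_le_of_lt (pvScanWord_len _) hlr)]
                    rw [show pvBexec BSt.normal (c :: d :: r2) =
                        (pvStepN c).2 ++ pvBexec (pvStepN c).1 (d :: r2) from rfl, hstepc]
                    rw [pvL_word (d :: r2) [c]]
                    simp

-- ===== formatter equivalence =====
-- A's loop body with the unused enumerate index stripped (proof device)
def pvStepF (pad : List Char) (uppercase : Bool)
    (st : List (List Char) × List (List Char) × Int) (tok : List Char) :
    List (List Char) × List (List Char) × Int :=
  pvStepFA pad uppercase st (0, tok)

lemma pvEnumFold_eq (pad : List Char) (uppercase : Bool) :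
    ∀ (toks : List (List Char)) (s : Int) (st : List (List Char) × List (List Char) × Int),
      (PySem.List.enumerate toks s).foldl (pvStepFA pad uppercase) st =
        toks.foldl (pvStepF pad uppercase) st := by
  intro toks
  induction toks with
  | nil => intro s st; simp [PySem.List.enumerate]
  | cons t ts ih =>
    intro s st
    rw [PySem.List.enumerate_cons]
    simp only [List.foldl_cons]
    rw [ih]
    congr 1

def pvRender (pad : List Char) (d : Int) (cs : List (List Char)) : List Char :=
  PySem.List.pyRepeat pad d ++ PySem.Chars.join [' '] cs

-- final 'if current_line: lines.append(...)' of A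
def pvFin (pad : List Char) (st : List (List Char) × List (List Char) × Int) :
    List (List Char) :=
  if !st.2.1.isEmpty then st.1 ++ [pvRender pad st.2.2 st.2.1] else st.1

-- token-level facts used by the formatter proof
lemma pvDispB_semi (u : Bool) : pvDispB u [';'] = [';'] := by
  cases u <;> simp [pvDispB] <;> decide

lemma pvDepthUpd_semi (depth : Int) : pvDepthUpd depth [';'] = depth := by
  simp [pvDepthUpd]

lemma pvNB_semi : PySem.Chars.upper [';'] ∉ pvNlBeforeA := by decide

lemma pvKw_semi : PySem.Chars.upper [';'] ∉ pvKeywordsA := by decide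

-- one step of A's loop, in the three shapes the proof meets
lemma pvStepF_plain (pad : List Char) (u : Bool) (lines cur : List (List Char)) (depth : Int)
    (t : List Char) (hNB : PySem.Chars.upper t ∉ pvNlBeforeA)
    (hsemi : ¬ t = [';']) :
    pvStepF pad u (lines, cur, depth) t =
      (lines, cur ++ [pvDispB u t], pvDepthUpd depth t) := by
  simp [pvStepF, pvStepFA, pvDispB, pvDepthUpd, hNB, hsemi, Bool.and_comm]
  split <;> rfl

lemma pvStepF_semi (pad : List Char) (u : Bool) (lines cur : List (List Char)) (depth : Int) :
    pvStepF pad u (lines, cur, depth) [';'] =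
      (lines ++ [pvRender pad depth (cur ++ [[';']]), []], [], depth) := by
  simp [pvStepF, pvStepFA, pvRender, pvNB_semi, pvKw_semi]

lemma pvStepF_flushNB (pad : List Char) (u : Bool) (lines cur : List (List Char)) (depth : Int)
    (t : List Char) (hNB : PySem.Chars.upper t ∈ pvNlBeforeA)
    (hcur : cur ≠ []) :
    pvStepF pad u (lines, cur, depth) t =
      pvStepF pad u (lines ++ [pvRender pad depth cur], [], depth) t := by
  have hq : ¬ t = [';'] := by rintro rfl; exact pvNB_semi hNB
  simp [pvStepF, pvStepFA, pvRender, hNB, hcur, hq]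

lemma pvGetLast_cons_ne (t : List Char) (l : List (List Char)) (ht : ¬ t = [';']) :
    ((t :: l).getLast? = some [';']) ↔ (l.getLast? = some [';']) := by
  cases l with
  | nil => simp [ht]
  | cons a l2 => rw [List.getLast?_cons_cons]

-- the inner line-consuming phase of A's fold, phrased through pvTakeB
lemma pvInner (pad : List Char) (uppercase : Bool) :
    ∀ (ts lines : List (List Char)) (cur : List (List Char)) (depth : Int), cur ≠ [] →
      ts.foldl (pvStepF pad uppercase) (lines, cur, depth) =
        (if (pvTakeB ts).1.getLast? = some [';'] then
          (pvTakeB ts).2.foldl (pvStepF pad uppercase)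
            (lines ++ [pvRender pad ((pvTakeB ts).1.foldl pvDepthUpd depth)
              (cur ++ (pvTakeB ts).1.map (pvDispB uppercase)), []], [],
              (pvTakeB ts).1.foldl pvDepthUpd depth)
        else if (pvTakeB ts).2 = [] then
          (lines, cur ++ (pvTakeB ts).1.map (pvDispB uppercase),
              (pvTakeB ts).1.foldl pvDepthUpd depth)
        else (pvTakeB ts).2.foldl (pvStepF pad uppercase)
            (lines ++ [pvRender pad ((pvTakeB ts).1.foldl pvDepthUpd depth)
              (cur ++ (pvTakeB ts).1.map (pvDispB uppercase))], [],
              (pvTakeB ts).1.foldl pvDepthUpd depth)) := by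
  intro ts
  fun_induction pvTakeB ts with
  | case1 =>
    intro lines cur depth hcur
    simp [pvTakeB]
  | case2 t ts hNB =>
    intro lines cur depth hcur
    simp only [pvTakeB, hNB, if_true, List.getLast?_nil, List.map_nil, List.append_nil,
      List.foldl_nil, reduceCtorEq, if_false, List.cons_ne_nil, List.foldl_cons]
    rw [pvStepF_flushNB pad uppercase lines cur depth t (by simpa using hNB) hcur]
  | case3 ts hNB =>
    intro lines cur depth hcur
    simp only [pvTakeB, hNB, Bool.false_eq_true, if_false, if_pos rfl, List.foldl_cons,
      List.getLast?_singleton, Option.some.injEq, if_true, List.map_cons, List.map_nil,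
      pvDispB_semi, List.foldl_nil, pvDepthUpd_semi]
    rw [pvStepF_semi]
  | case4 t ts hNB hsemi ih =>
    intro lines cur depth hcur
    simp only [pvTakeB, hNB, Bool.false_eq_true, if_false, hsemi, List.foldl_cons]
    rw [pvStepF_plain pad uppercase lines cur depth t (by simpa using hNB) hsemi]
    rw [ih lines (cur ++ [pvDispB uppercase t]) (pvDepthUpd depth t) (by simp)]
    simp only [pvGetLast_cons_ne t (pvTakeB ts).1 hsemi]
    simp

-- main formatter lemma: A's fold + final flush = B's staged layout
lemma pvMainF (pad : List Char) (uppercase : Bool) :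
    ∀ (N : Nat) (toks : List (List Char)), toks.length ≤ N →
      ∀ (lines : List (List Char)) (depth : Int),
        pvFin pad (toks.foldl (pvStepF pad uppercase) (lines, [], depth)) =
          lines ++ pvLayout pad uppercase toks depth := by
  intro N
  induction N with
  | zero =>
    intro toks hlen lines depth
    have h0 : toks = [] := List.length_eq_zero_iff.mp (by omega)
    subst h0
    simp [pvFin, pvLayout]
  | succ N ih =>
    intro toks hlen lines depth
    cases toks with
    | nil => simp [pvFin, pvLayout]
    | cons t ts =>
      simp only [List.length_cons] at hlen
      by_cases ht : t = [';']
      · subst ht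
        rw [List.foldl_cons, pvStepF_semi pad uppercase lines [] depth,
          ih ts (by omega)]
        simp [pvLayout, pvFirstLine, pvRender, pvDispB_semi, pvDepthUpd_semi]
      · have hNBe : pvStepF pad uppercase (lines, [], depth) t =
            (lines, [pvDispB uppercase t], pvDepthUpd depth t) := by
          simp [pvStepF, pvStepFA, pvDispB, pvDepthUpd, ht, Bool.and_comm]
          split <;> rfl
        rw [List.foldl_cons, hNBe,
          pvInner pad uppercase ts lines [pvDispB uppercase t] (pvDepthUpd depth t) (by simp)]
        have hlay : pvLayout pad uppercase (t :: ts) depth =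
            (pvRender pad ((pvTakeB ts).1.foldl pvDepthUpd (pvDepthUpd depth t))
              ((pvDispB uppercase t) :: (pvTakeB ts).1.map (pvDispB uppercase))) ::
              ((if (pvTakeB ts).1.getLast? = some [';'] then [([] : List Char)] else []) ++
                pvLayout pad uppercase (pvTakeB ts).2
                  ((pvTakeB ts).1.foldl pvDepthUpd (pvDepthUpd depth t))) := by
          rw [pvLayout]
          simp only [pvFirstLine, ht, if_false, List.foldl_cons, List.map_cons, pvRender]
          simp only [pvGetLast_cons_ne t (pvTakeB ts).1 ht]
        by_cases hS : (pvTakeB ts).1.getLast? = some [';']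
        · rw [if_pos hS]
          rw [ih (pvTakeB ts).2 (le_trans (pvTakeB_len ts) (by omega))]
          rw [hlay, if_pos hS]
          simp
        · rw [if_neg hS]
          by_cases hE : (pvTakeB ts).2 = []
          · rw [if_pos hE]
            rw [hlay, if_neg hS]
            simp [pvFin, pvLayout, hE]
          · rw [if_neg hE]
            rw [ih (pvTakeB ts).2 (le_trans (pvTakeB_len ts) (by omega))]
            rw [hlay, if_neg hS]
            simp

-- ===== VERDICT (by name: the statement is the Claim_ definition above) =====
theorem format_sql_spec : Claim_equal_format_sql := by
  intro sql indent uppercase _hdom hpre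
  unfold Spec_format_sql format_sql format_sql_alt
  simp only
  rw [pvTokB_eq, ← pvMain (sql.toList.length + 1) sql.toList hpre (by omega)]
  rw [pvEnumFold_eq]
  have h := pvMainF (PySem.List.pyRepeat [' '] indent) uppercase
    (pvTokA (sql.toList.length + 1) sql.toList).length
    (pvTokA (sql.toList.length + 1) sql.toList) le_rfl [] 0
  simp only [pvFin, pvRender, List.nil_append] at h
  rw [h]
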